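-- pv_equiv track=rewrite | github.com/Vignesh-1101/DSA-PYTHON | Python/sum_of_numbers.py | calculate_and_display_property
-- ===== SOURCE A (Python) =====
-- def calculate_and_display_property(land_values):
--     # To store the bounds
--     n = len(land_values)
--     left_bounds = [-1] * n
--     right_bounds = [n] * n
--
--     # Calculate left bounds using a monotonic decreasing stack
--     stack = []
--     for i in range(n):
--         while stack and land_values[stack[-1]] <= land_values[i]:
--             stack.pop()
--         left_bounds[i] = stack[-1] if stack else -1
--         stack.append(i)
--
--     # Calculate right bounds using a monotonic decreasing stack
--     stack = []
--     for i in range(n - 1, -1, -1):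
--         while stack and land_values[stack[-1]] <= land_values[i]:
--             stack.pop()
--         right_bounds[i] = stack[-1] if stack else n
--         stack.append(i)
--
--     # Calculate the total value for each king
--     result = []
--     for i in range(n):
--         total_value = sum(land_values[left_bounds[i] + 1 : right_bounds[i]])
--         result.append(total_value)
--
--     return result
-- ===== SOURCE B (Python) =====
-- def calculate_and_display_property(land_values):
--     # Per-element window expansion: widen [lo, hi) around i past all values <= land_values[i].
--     n = len(land_values)
--     result = []
--     for i in range(n):
--         lo = i
--         while lo > 0 and land_values[lo - 1] <= land_values[i]:
--             lo -= 1
--         hi = i + 1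
--         while hi < n and land_values[hi] <= land_values[i]:
--             hi += 1
--         result.append(sum(land_values[lo:hi]))
--     return result
-- ===== Notes on version B (the rewrite author's own statement) =====
-- stated objective: simpler
-- what changed: Replaced A's two monotonic-stack passes plus bound arrays by a direct per-element window expansion: for each index walk left and right past all values <= it and sum that window.
import Mathlib
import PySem

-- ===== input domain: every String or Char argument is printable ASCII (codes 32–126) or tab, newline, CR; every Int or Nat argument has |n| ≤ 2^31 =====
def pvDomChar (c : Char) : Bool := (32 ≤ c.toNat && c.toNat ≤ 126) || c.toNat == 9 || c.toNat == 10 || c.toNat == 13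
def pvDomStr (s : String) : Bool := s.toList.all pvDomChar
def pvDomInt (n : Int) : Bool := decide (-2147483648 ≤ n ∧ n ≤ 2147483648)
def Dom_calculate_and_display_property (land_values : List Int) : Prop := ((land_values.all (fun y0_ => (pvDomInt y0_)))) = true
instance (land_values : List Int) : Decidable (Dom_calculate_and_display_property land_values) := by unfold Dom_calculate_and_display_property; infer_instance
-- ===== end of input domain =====

-- B replaces A's two monotonic-stack passes and per-element slice sums by a direct
-- per-element window expansion (no stacks, no bound arrays); objective: simpler.

-- ===== PORT A =====
-- the Python stack is held head-first: head = Python stack[-1]; 'while stack and land_values[stack[-1]] <= land_values[i]: stack.pop()'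
def aPop (v : List Int) (x : Int) : List Nat → List Nat
  | [] => []
  | j :: s => if v.getD j 0 ≤ x then aPop v x s else j :: s

-- one iteration of the first loop: state = (left_bounds so far, stack)
def aLeftStep (v : List Int) (acc : List Int × List Nat) (i : Nat) : List Int × List Nat :=
  let st := aPop v (v.getD i 0) acc.2
  (acc.1 ++ [(match st with | [] => (-1 : Int) | j :: _ => (j : Int))], i :: st)

-- one iteration of the second loop (i runs downward, so consing builds right_bounds in index order)
def aRightStep (v : List Int) (acc : List Int × List Nat) (i : Nat) : List Int × List Nat :=
  let st := aPop v (v.getD i 0) acc.2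
  ((match st with | [] => (v.length : Int) | j :: _ => (j : Int)) :: acc.1, i :: st)

def calculate_and_display_property (land_values : List Int) : List Int :=
  let n := land_values.length
  let left_bounds := ((List.range n).foldl (aLeftStep land_values) ([], [])).1
  let right_bounds := ((List.range n).reverse.foldl (aRightStep land_values) ([], [])).1
  (List.range n).foldl (fun res i =>
    res ++ [(PySem.List.slice land_values (some (left_bounds.getD i 0 + 1)) (some (right_bounds.getD i 0))).sum]) []

-- ===== PORT B =====
-- 'lo = i; while lo > 0 and land_values[lo-1] <= land_values[i]: lo -= 1'
def bLo (v : List Int) (x : Int) : Nat → Nat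
  | 0 => 0
  | l + 1 => if v.getD l 0 ≤ x then bLo v x l else l + 1

-- 'hi = i+1; while hi < n and land_values[hi] <= land_values[i]: hi += 1'
def bHi (v : List Int) (x : Int) (h : Nat) : Nat :=
  if h < v.length then (if v.getD h 0 ≤ x then bHi v x (h + 1) else h) else h
termination_by v.length - h

def calculate_and_display_property_alt (land_values : List Int) : List Int :=
  (List.range land_values.length).foldl (fun res i =>
    let lo := bLo land_values (land_values.getD i 0) i
    let hi := bHi land_values (land_values.getD i 0) (i + 1)
    res ++ [((land_values.take hi).drop lo).sum]) []

-- ===== PRECONDITION & SPEC =====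
def Spec_calculate_and_display_property (land_values : List Int) (out : List Int) : Prop := out = calculate_and_display_property_alt land_values
instance (land_values : List Int) (out : List Int) : Decidable (Spec_calculate_and_display_property land_values out) := by unfold Spec_calculate_and_display_property; infer_instance

-- ===== CLAIM (what is proved, stated in full; the proofs are below) =====
def Claim_equal_calculate_and_display_property : Prop := ∀ (land_values : List Int), Dom_calculate_and_display_property land_values → Spec_calculate_and_display_property land_values (calculate_and_display_property land_values)

-- ===== LEMMAS AND PROOFS =====

-- specification stacks: what A's two monotonic stacks hold after processing a prefix/suffix
def keepTo (v : List Int) (i j : Nat) : Bool := decide (∀ k ∈ List.range i, j < k → v.getD k 0 < v.getD j 0)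
def stkL (v : List Int) (i : Nat) : List Nat := ((List.range i).filter (keepTo v i)).reverse
def keepFrom (v : List Int) (i j : Nat) : Bool := decide (i ≤ j ∧ ∀ k ∈ List.range v.length, i ≤ k → k < j → v.getD k 0 < v.getD j 0)
def stkR (v : List Int) (i : Nat) : List Nat := (List.range v.length).filter (keepFrom v i)
def lbVal (v : List Int) (i : Nat) : Int := match aPop v (v.getD i 0) (stkL v i) with | [] => -1 | j :: _ => (j : Int)
def rbVal (v : List Int) (i : Nat) : Int := match aPop v (v.getD i 0) (stkR v (i + 1)) with | [] => (v.length : Int) | j :: _ => (j : Int)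

-- generic: on a value-increasing stack, popping 'while top ≤ x' is filtering
lemma aPop_eq_filter (v : List Int) (x : Int) :
    ∀ (l : List Nat), l.Pairwise (fun a b => v.getD a 0 < v.getD b 0) →
      aPop v x l = l.filter (fun j => !decide (v.getD j 0 ≤ x)) := by
  intro l hl
  induction l with
  | nil => rfl
  | cons j s ih =>
    rw [List.pairwise_cons] at hl
    obtain ⟨hj, hs⟩ := hl
    simp only [aPop, List.filter_cons]
    split
    next hle =>
      rw [if_neg (by rw [decide_eq_true hle]; simp)]
      exact ih hs
    next hle =>
      rw [if_pos (by rw [decide_eq_false hle]; simp)]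
      congr 1
      symm
      rw [List.filter_eq_self]
      intro b hb
      have := hj b hb
      simp only [Bool.not_eq_true', decide_eq_false_iff_not]
      omega


-- generic: head of a filter, located by a Pairwise relation killing everything before it
lemma head_filter_eq {α : Type} {p : α → Bool} {R : α → α → Prop} :
    ∀ {l : List α}, l.Pairwise R → ∀ {a : α}, a ∈ l → p a = true →
      (∀ b ∈ l, R b a → p b = false) → (l.filter p).head? = some a := by
  intro l hl
  induction l with
  | nil => intro a ha; simp at ha
  | cons c t ih =>
    rw [List.pairwise_cons] at hl
    obtain ⟨hc, ht⟩ := hl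
    intro a ha hpa hother
    rcases List.mem_cons.mp ha with rfl | hat
    · simp [hpa]
    · have hpc : p c = false := hother c List.mem_cons_self (hc a hat)
      simp only [List.filter_cons, hpc]
      simp only [Bool.false_eq_true, if_false]
      exact ih ht hat hpa (fun b hb hr => hother b (List.mem_cons_of_mem c hb) hr)



-- membership in the specification stacks
lemma mem_stkL (v : List Int) (i j : Nat) :
    j ∈ stkL v i ↔ j < i ∧ (∀ k ∈ List.range i, j < k → v.getD k 0 < v.getD j 0) := by
  simp [stkL, keepTo, List.mem_filter, List.mem_range]

lemma mem_stkR (v : List Int) (i j : Nat) :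
    j ∈ stkR v i ↔ j < v.length ∧ i ≤ j ∧ (∀ k ∈ List.range v.length, i ≤ k → k < j → v.getD k 0 < v.getD j 0) := by
  simp [stkR, keepFrom, List.mem_filter, List.mem_range]

-- the left stack is strictly index-decreasing and value-increasing along the list
lemma stkL_pairwise_idx (v : List Int) (i : Nat) : (stkL v i).Pairwise (fun a b => b < a) := by
  rw [stkL, List.pairwise_reverse]
  exact (List.Pairwise.sublist List.filter_sublist List.pairwise_lt_range)

lemma stkL_pairwise_val (v : List Int) (i : Nat) :
    (stkL v i).Pairwise (fun a b => v.getD a 0 < v.getD b 0) := by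
  rw [stkL, List.pairwise_reverse]
  have h1 : ((List.range i).filter (keepTo v i)).Pairwise (fun a b : Nat => a < b) :=
    List.Pairwise.sublist List.filter_sublist List.pairwise_lt_range
  refine h1.imp_of_mem ?_
  intro a b ha hb hab
  rw [List.mem_filter] at ha hb
  have hka : ∀ k ∈ List.range i, a < k → v.getD k 0 < v.getD a 0 := of_decide_eq_true ha.2
  exact hka b hb.1 hab

-- the right stack is strictly index-increasing and value-increasing along the list
lemma stkR_pairwise_idx (v : List Int) (i : Nat) : (stkR v i).Pairwise (fun a b => a < b) :=
  List.Pairwise.sublist List.filter_sublist List.pairwise_lt_range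

lemma stkR_pairwise_val (v : List Int) (i : Nat) :
    (stkR v i).Pairwise (fun a b => v.getD a 0 < v.getD b 0) := by
  refine (stkR_pairwise_idx v i).imp_of_mem ?_
  intro a b ha hb hab
  rw [mem_stkR] at ha hb
  exact hb.2.2 a (List.mem_range.mpr ha.1) ha.2.1 hab

-- the left stack really is stkL
lemma stkL_succ (v : List Int) (i : Nat) :
    stkL v (i + 1) = i :: aPop v (v.getD i 0) (stkL v i) := by
  rw [aPop_eq_filter v _ _ (stkL_pairwise_val v i), stkL, stkL, List.range_succ,
    List.filter_append, List.filter_reverse, List.filter_filter]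
  have hkeep : keepTo v (i + 1) i = true := by
    simp [keepTo, List.mem_range]
    omega
  have hcongr : ∀ j ∈ List.range i,
      keepTo v (i + 1) j = (!decide (v.getD j 0 ≤ v.getD i 0) && keepTo v i j) := by
    intro j hj
    rw [List.mem_range] at hj
    rw [Bool.eq_iff_iff]
    simp only [keepTo, Bool.and_eq_true, decide_eq_true_eq, Bool.not_eq_true',
      decide_eq_false_iff_not, not_le, List.mem_range]
    constructor
    · intro h
      exact ⟨h i (by omega) hj, fun k hk hjk => h k (by omega) hjk⟩
    · rintro ⟨h2, h1⟩ k hk hjk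
      by_cases hki : k = i
      · subst hki; exact h2
      · exact h1 k (by omega) hjk
  rw [List.filter_congr hcongr]
  simp [hkeep]

lemma left_invariant (v : List Int) :
    ∀ n, (List.range n).foldl (aLeftStep v) ([], []) = ((List.range n).map (lbVal v), stkL v n) := by
  intro n
  induction n with
  | zero => simp [stkL]
  | succ n ih =>
    rw [List.range_succ, List.foldl_append, ih]
    simp only [List.foldl_cons, List.foldl_nil, aLeftStep, List.map_append, List.map_cons,
      List.map_nil]
    rw [stkL_succ]
    rfl



-- a filter of range n whose smallest accepted element is i starts with i
lemma filter_range_min {p : Nat → Bool} :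
    ∀ {n i : Nat}, i < n → p i = true → (∀ j, j < i → p j = false) →
      (List.range n).filter p = i :: (List.range n).filter (fun j => p j && decide (i < j)) := by
  intro n
  induction n with
  | zero => intro i h; omega
  | succ n ih =>
    intro i hin hpi hlow
    rw [List.range_succ, List.filter_append, List.filter_append]
    by_cases hi : i < n
    · rw [ih hi hpi hlow]
      simp only [List.cons_append]
      congr 2
      simp only [List.filter]
      by_cases hpn : p n = true
      · rw [hpn]
        have hdec : decide (i < n) = true := decide_eq_true hi
        simp [hdec]
      · simp only [Bool.not_eq_true] at hpn
        simp [hpn]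
    · have hieq : i = n := by omega
      subst hieq
      have h1 : (List.range i).filter p = [] := by
        rw [List.filter_eq_nil_iff]
        intro a ha
        rw [List.mem_range] at ha
        simp [hlow a ha]
      have h2 : (List.range i).filter (fun j => p j && decide (i < j)) = [] := by
        rw [List.filter_eq_nil_iff]
        intro a ha
        rw [List.mem_range] at ha
        simp [hlow a ha]
      rw [h1, h2]
      simp [hpi]

lemma stkR_len (v : List Int) : stkR v v.length = [] := by
  rw [stkR, List.filter_eq_nil_iff]
  intro j hj
  rw [List.mem_range] at hj
  simp [keepFrom]
  omega

-- the right stack really is stkR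
lemma stkR_succ (v : List Int) (i : Nat) (hi : i < v.length) :
    stkR v i = i :: aPop v (v.getD i 0) (stkR v (i + 1)) := by
  have hpi : keepFrom v i i = true := by
    simp [keepFrom]
    omega
  have hlow : ∀ j, j < i → keepFrom v i j = false := by
    intro j hj
    simp [keepFrom]
    omega
  rw [stkR, filter_range_min hi hpi hlow,
    aPop_eq_filter v _ _ (stkR_pairwise_val v (i + 1)), stkR, List.filter_filter]
  congr 1
  apply List.filter_congr
  intro j hj
  rw [List.mem_range] at hj
  rw [Bool.eq_iff_iff]
  simp only [keepFrom, Bool.and_eq_true, decide_eq_true_eq, Bool.not_eq_true',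
    decide_eq_false_iff_not, not_le, List.mem_range]
  constructor
  · rintro ⟨⟨hij, hall⟩, hlt⟩
    exact ⟨hall i (by omega) (le_refl i) hlt, by omega,
      fun k hk h1 h2 => hall k hk (by omega) h2⟩
  · rintro ⟨hvi, hij, hall⟩
    refine ⟨⟨by omega, fun k hk h1 h2 => ?_⟩, by omega⟩
    by_cases hki : k = i
    · subst hki; exact hvi
    · exact hall k hk (by omega) h2


lemma right_invariant (v : List Int) :
    ∀ k i, i + k = v.length →
      (List.range' i k).foldr (fun x s => aRightStep v s x) ([], []) = ((List.range' i k).map (rbVal v), stkR v i) := by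
  intro k
  induction k with
  | zero =>
    intro i hik
    have : i = v.length := by omega
    subst this
    simp [stkR_len]
  | succ k ih =>
    intro i hik
    rw [List.range'_succ, List.foldr_cons, ih (i + 1) (by omega)]
    have hi : i < v.length := by omega
    simp only [aRightStep, List.map_cons]
    rw [← stkR_succ v i hi]
    rfl


-- characterisation of B's walks
lemma bLo_le (v : List Int) (x : Int) : ∀ i, bLo v x i ≤ i := by
  intro i
  induction i with
  | zero => simp [bLo]
  | succ l ih => simp only [bLo]; split <;> omega


lemma bLo_all (v : List Int) (x : Int) : ∀ i k, bLo v x i ≤ k → k < i → v.getD k 0 ≤ x := by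
  intro i
  induction i with
  | zero => intro k h1 h2; omega
  | succ l ih =>
    intro k h1 h2
    simp only [bLo] at h1
    split at h1
    · by_cases hkl : k < l
      · exact ih k h1 hkl
      · have hk : k = l := by omega
        subst hk; assumption
    · omega


lemma bLo_gt (v : List Int) (x : Int) : ∀ i l, bLo v x i = l + 1 → x < v.getD l 0 := by
  intro i
  induction i with
  | zero => intro l h; simp [bLo] at h
  | succ m ih =>
    intro l h
    simp only [bLo] at h
    split at h
    · exact ih l h
    · have : l = m := by omega
      subst this; omega


lemma bHi_ge (v : List Int) (x : Int) : ∀ h, h ≤ bHi v x h := by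
  have key : ∀ d h, v.length - h ≤ d → h ≤ bHi v x h := by
    intro d
    induction d with
    | zero =>
      intro h hd
      rw [bHi]
      split
      · omega
      · exact le_refl h
    | succ d ih =>
      intro h hd
      rw [bHi]
      split
      · split
        · exact le_trans (Nat.le_succ h) (ih (h + 1) (by omega))
        · exact le_refl h
      · exact le_refl h
  intro h
  exact key (v.length - h) h (le_refl _)


lemma bHi_le (v : List Int) (x : Int) : ∀ h, h ≤ v.length → bHi v x h ≤ v.length := by
  have key : ∀ d h, v.length - h ≤ d → h ≤ v.length → bHi v x h ≤ v.length := by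
    intro d
    induction d with
    | zero =>
      intro h hd hh
      rw [bHi]
      split
      · omega
      · exact hh
    | succ d ih =>
      intro h hd hh
      rw [bHi]
      split
      · split
        · exact ih (h + 1) (by omega) (by omega)
        · exact hh
      · exact hh
  intro h hh
  exact key (v.length - h) h (le_refl _) hh


lemma bHi_all (v : List Int) (x : Int) : ∀ h k, h ≤ k → k < bHi v x h → v.getD k 0 ≤ x := by
  have key : ∀ d h, v.length - h ≤ d → ∀ k, h ≤ k → k < bHi v x h → v.getD k 0 ≤ x := by
    intro d
    induction d with
    | zero =>
      intro h hd k h1 h2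
      rw [bHi] at h2
      split at h2
      · omega
      · omega
    | succ d ih =>
      intro h hd k h1 h2
      rw [bHi] at h2
      split at h2
      · split at h2
        · by_cases hk : k = h
          · subst hk; assumption
          · exact ih (h + 1) (by omega) k (by omega) h2
        · omega
      · omega
  intro h k h1 h2
  exact key (v.length - h) h (le_refl _) k h1 h2


lemma bHi_gt (v : List Int) (x : Int) : ∀ h, bHi v x h < v.length → x < v.getD (bHi v x h) 0 := by
  have key : ∀ d h, v.length - h ≤ d → bHi v x h < v.length → x < v.getD (bHi v x h) 0 := by
    intro d
    induction d with
    | zero =>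
      intro h hd hlt
      rw [bHi] at hlt ⊢
      split at hlt
      · omega
      · omega
    | succ d ih =>
      intro h hd hlt
      rw [bHi] at hlt ⊢
      split at hlt
      next h1 =>
        rw [if_pos h1] at *
        split at hlt
        next h2 =>
          rw [if_pos h2]
          exact ih (h + 1) (by omega) hlt
        next h2 =>
          rw [if_neg h2]
          omega
      next h1 =>
        rw [if_neg h1]
        omega
  intro h
  exact key (v.length - h) h (le_refl _)


-- the bounds agree
lemma lbVal_eq (v : List Int) (i : Nat) :
    lbVal v i = (bLo v (v.getD i 0) i : Int) - 1 := by
  unfold lbVal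
  rw [aPop_eq_filter v _ _ (stkL_pairwise_val v i)]
  rcases hb : bLo v (v.getD i 0) i with _ | l
  · have hnil : (stkL v i).filter (fun j => !decide (v.getD j 0 ≤ v.getD i 0)) = [] := by
      rw [List.filter_eq_nil_iff]
      intro j hjmem
      have hj := (mem_stkL v i j).mp hjmem
      have hle : v.getD j 0 ≤ v.getD i 0 := bLo_all v (v.getD i 0) i j (by omega) hj.1
      simp only [Bool.not_eq_true', decide_eq_false_iff_not, not_not]
      exact hle
    rw [hnil]
    norm_num
  · have hle := bLo_le v (v.getD i 0) i
    rw [hb] at hle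
    have hgt := bLo_gt v (v.getD i 0) i l hb
    have hhead : ((stkL v i).filter (fun j => !decide (v.getD j 0 ≤ v.getD i 0))).head? = some l := by
      apply head_filter_eq (stkL_pairwise_idx v i)
      · rw [mem_stkL]
        refine ⟨by omega, fun k hk hlk => ?_⟩
        rw [List.mem_range] at hk
        have hkx : v.getD k 0 ≤ v.getD i 0 := bLo_all v (v.getD i 0) i k (by omega) hk
        omega
      · simp only [Bool.not_eq_true', decide_eq_false_iff_not, not_le]
        exact hgt
      · intro b hbmem hlb
        have hbm := (mem_stkL v i b).mp hbmem
        have hbx : v.getD b 0 ≤ v.getD i 0 := bLo_all v (v.getD i 0) i b (by omega) hbm.1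
        rw [decide_eq_true hbx]
        rfl
    rcases hcase : (stkL v i).filter (fun j => !decide (v.getD j 0 ≤ v.getD i 0)) with _ | ⟨a, t⟩
    · rw [hcase] at hhead; simp at hhead
    · rw [hcase] at hhead
      simp only [List.head?_cons, Option.some.injEq] at hhead
      subst hhead
      push_cast
      ring


lemma rbVal_eq (v : List Int) (i : Nat) (hi : i < v.length) :
    rbVal v i = (bHi v (v.getD i 0) (i + 1) : Int) := by
  have hge := bHi_ge v (v.getD i 0) (i + 1)
  have hle := bHi_le v (v.getD i 0) (i + 1) (by omega)
  unfold rbVal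
  rw [aPop_eq_filter v _ _ (stkR_pairwise_val v (i + 1))]
  by_cases hr : bHi v (v.getD i 0) (i + 1) = v.length
  · have hnil : (stkR v (i + 1)).filter (fun j => !decide (v.getD j 0 ≤ v.getD i 0)) = [] := by
      rw [List.filter_eq_nil_iff]
      intro j hjmem
      have hj := (mem_stkR v (i + 1) j).mp hjmem
      have hjx : v.getD j 0 ≤ v.getD i 0 :=
        bHi_all v (v.getD i 0) (i + 1) j hj.2.1 (by omega)
      simp only [Bool.not_eq_true', decide_eq_false_iff_not, not_not]
      exact hjx
    rw [hnil, hr]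
  · have hrlt : bHi v (v.getD i 0) (i + 1) < v.length := by omega
    have hgt := bHi_gt v (v.getD i 0) (i + 1) hrlt
    have hhead : ((stkR v (i + 1)).filter (fun j => !decide (v.getD j 0 ≤ v.getD i 0))).head? =
        some (bHi v (v.getD i 0) (i + 1)) := by
      apply head_filter_eq (stkR_pairwise_idx v (i + 1))
      · rw [mem_stkR]
        refine ⟨hrlt, hge, fun k hk h1 h2 => ?_⟩
        have hkx : v.getD k 0 ≤ v.getD i 0 := bHi_all v (v.getD i 0) (i + 1) k h1 h2
        omega
      · simp only [Bool.not_eq_true', decide_eq_false_iff_not, not_le]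
        exact hgt
      · intro b hbmem hbl
        have hbm := (mem_stkR v (i + 1) b).mp hbmem
        have hbx : v.getD b 0 ≤ v.getD i 0 := bHi_all v (v.getD i 0) (i + 1) b hbm.2.1 hbl
        rw [decide_eq_true hbx]
        rfl
    rcases hcase : (stkR v (i + 1)).filter (fun j => !decide (v.getD j 0 ≤ v.getD i 0)) with _ | ⟨a, t⟩
    · rw [hcase] at hhead; simp at hhead
    · rw [hcase] at hhead
      simp only [List.head?_cons, Option.some.injEq] at hhead
      subst hhead
      rfl


-- fold-append is map
lemma foldl_push_eq_map {α β : Type} (f : α → β) :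
    ∀ (l : List α) (acc : List β), l.foldl (fun r i => r ++ [f i]) acc = acc ++ l.map f := by
  intro l
  induction l with
  | nil => intro acc; simp
  | cons a t ih => intro acc; simp [List.foldl_cons, ih, List.append_assoc]


-- ===== VERDICT (by name: the statement is the Claim_ definition above) =====
theorem calculate_and_display_property_spec : Claim_equal_calculate_and_display_property := by
  intro v _
  unfold Spec_calculate_and_display_property
  simp only [calculate_and_display_property, calculate_and_display_property_alt]
  rw [left_invariant, List.foldl_reverse]
  have hr : (List.range v.length).foldr (fun x s => aRightStep v s x) ([], []) =
      ((List.range v.length).map (rbVal v), stkR v 0) := by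
    rw [List.range_eq_range']
    exact right_invariant v v.length 0 (by omega)
  rw [hr]
  rw [foldl_push_eq_map, foldl_push_eq_map]
  simp only [List.nil_append]
  apply List.map_congr_left
  intro i hi
  rw [List.mem_range] at hi
  have hgl : (((List.range v.length).map (lbVal v)).getD i 0) = lbVal v i := by
    rw [List.getD_eq_getElem?_getD, List.getElem?_map, List.getElem?_range hi]; rfl
  have hgr : (((List.range v.length).map (rbVal v)).getD i 0) = rbVal v i := by
    rw [List.getD_eq_getElem?_getD, List.getElem?_map, List.getElem?_range hi]; rfl
  rw [hgl, hgr, lbVal_eq, rbVal_eq v i hi]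
  have h1 : (bLo v (v.getD i 0) i : Int) - 1 + 1 = ((bLo v (v.getD i 0) i : Nat) : Int) := by
    ring
  rw [h1, PySem.List.slice_natCast, List.drop_take]
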